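-- pv_equiv track=rewrite | github.com/drdeford/sfc_analysis | Single_Core/curves.py | nn8
-- ===== SOURCE A (Python) =====
-- def nn8(point_list):
--     p=[]
--     for j in range(len(point_list)):
--         p.append([j])
--     q=[]
--     for k in range(len(point_list)):
--         q.append([k])
--     for i in range(len(point_list)):
--         x=point_list[i][0]
--         y=point_list[i][1]
--         a=[[x+1,y],[x+1,y+1],[x+1,y-1],[x,y+1],[x,y-1],[x-1,y],[x-1,y+1],[x-1,y-1]]
--         p[i].append(a)
--     for l in range(len(point_list)):
--         for m in p[l][1]:
--             for n in range(len(point_list)):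
--                 if m[0]==point_list[n][0] and m[1]==point_list[n][1]:
--                     q[l].append(n)
--     return q
-- ===== SOURCE B (Python) =====
-- def nn8(point_list):
--     idx = {}
--     for i, pt in enumerate(point_list):
--         idx.setdefault((pt[0], pt[1]), []).append(i)
--     out = []
--     for l, pt in enumerate(point_list):
--         x, y = pt[0], pt[1]
--         row = [l]
--         for c in ((x + 1, y), (x + 1, y + 1), (x + 1, y - 1), (x, y + 1),
--                   (x, y - 1), (x - 1, y), (x - 1, y + 1), (x - 1, y - 1)):
--             row.extend(idx.get(c, []))
--         out.append(row)
--     return out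
-- ===== Notes on version B (the rewrite author's own statement) =====
-- stated objective: faster
-- what changed: Replaced the per-neighbor full scan of the point list by a dict built once from coordinate pair to its list of indices, so each of the 8 neighbor cells is a hash lookup.
import Mathlib
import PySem

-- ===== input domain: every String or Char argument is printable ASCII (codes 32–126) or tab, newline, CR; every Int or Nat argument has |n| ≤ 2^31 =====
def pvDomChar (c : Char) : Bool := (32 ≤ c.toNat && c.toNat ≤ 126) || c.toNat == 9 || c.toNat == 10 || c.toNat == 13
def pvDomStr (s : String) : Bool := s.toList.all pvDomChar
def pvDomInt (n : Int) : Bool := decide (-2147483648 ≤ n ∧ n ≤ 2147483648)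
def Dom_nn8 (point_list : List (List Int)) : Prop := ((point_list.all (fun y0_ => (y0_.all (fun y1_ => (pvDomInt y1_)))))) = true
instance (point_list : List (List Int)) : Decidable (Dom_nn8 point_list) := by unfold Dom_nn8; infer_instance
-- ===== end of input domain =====

-- B replaces A's per-neighbor O(n) scan by a dict from coordinate pair to index list built once (asymptotically faster).

-- ===== PORT A =====
-- pt[0] / pt[1] of a point row; total via pyGetD, exact under Pre_nn8 (rows of length ≥ 2)
def nn8Coord (r : List Int) : Int × Int :=
  (PySem.List.pyGetD r 0 0, PySem.List.pyGetD r 1 0)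

-- the literal list a = [[x+1,y],...] of A
def nn8Nbrs (x y : Int) : List (List Int) :=
  [[x+1,y],[x+1,y+1],[x+1,y-1],[x,y+1],[x,y-1],[x-1,y],[x-1,y+1],[x-1,y-1]]

-- A's p[i] is the heterogeneous [i, a]; the prefix [i] is never read, so p stores a (the list of 8 coords).
def nn8 (point_list : List (List Int)) : List (List Int) :=
  let n : Int := point_list.length
  let p : List (List (List Int)) :=
    (PySem.List.pyRange 0 n 1).map (fun i =>
      let x := (nn8Coord (PySem.List.pyGetD point_list i [])).1
      let y := (nn8Coord (PySem.List.pyGetD point_list i [])).2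
      nn8Nbrs x y)
  (PySem.List.pyRange 0 n 1).map (fun l =>
    (PySem.List.pyGetD p l []).foldl (fun acc m =>
      (PySem.List.pyRange 0 n 1).foldl (fun acc2 nIdx =>
        if nn8Coord m = nn8Coord (PySem.List.pyGetD point_list nIdx [])
        then acc2 ++ [nIdx] else acc2) acc) [l])

-- ===== PORT B =====
-- the 8 neighbor coordinate pairs of B
def nn8NbrPairs (x y : Int) : List (Int × Int) :=
  [(x+1,y),(x+1,y+1),(x+1,y-1),(x,y+1),(x,y-1),(x-1,y),(x-1,y+1),(x-1,y-1)]

def nn8_alt (point_list : List (List Int)) : List (List Int) :=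
  let idx : PySem.Dict (Int × Int) (List Int) :=
    (PySem.List.enumerate point_list).foldl
      (fun d q => d.modify (nn8Coord q.2) [] (· ++ [q.1])) PySem.Dict.empty
  (PySem.List.enumerate point_list).map (fun q =>
    let x := (nn8Coord q.2).1
    let y := (nn8Coord q.2).2
    (nn8NbrPairs x y).foldl (fun row c => row ++ idx.getD c []) [q.1])

-- ===== PRECONDITION & SPEC =====
-- Pre_ excludes points with fewer than 2 coordinates, on which Python A raises IndexError.
def Pre_nn8 (point_list : List (List Int)) : Prop :=
  ∀ r ∈ point_list, 2 ≤ r.length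
instance (point_list : List (List Int)) : Decidable (Pre_nn8 point_list) := by
  unfold Pre_nn8; infer_instance

def pvWitness_nn8 : List (List Int) := [[0,0],[1,0],[1,1],[0,0]]

def Spec_nn8 (point_list : List (List Int)) (out : List (List Int)) : Prop := out = nn8_alt point_list
instance (point_list : List (List Int)) (out : List (List Int)) : Decidable (Spec_nn8 point_list out) := by unfold Spec_nn8; infer_instance

-- ===== CLAIM (what is proved, stated in full; the proofs are below) =====
def Claim_equal_nn8 : Prop := ∀ (point_list : List (List Int)), Dom_nn8 point_list → Pre_nn8 point_list → Spec_nn8 point_list (nn8 point_list)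

-- ===== LEMMAS AND PROOFS =====

-- occurrence positions (as Ints) of coordinate c in pl
def nn8Occ (c : Int × Int) : List (List Int) → List Int
  | [] => []
  | r :: rest => (if nn8Coord r = c then [(0 : Int)] else []) ++ (nn8Occ c rest).map (· + 1)

-- B's dict lookup computes nn8Occ
lemma nn8_enum_occ (pl : List (List Int)) (c : Int × Int) : ∀ s : Int,
    ((((PySem.List.enumerate pl s).map (fun q => (nn8Coord q.2, q.1))).filter
        (fun q => q.1 == c)).map (·.2)) = (nn8Occ c pl).map (· + s) := by
  induction pl with
  | nil => intro s; simp [PySem.List.enumerate_nil, nn8Occ]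
  | cons r rest ih =>
    intro s
    rw [PySem.List.enumerate_cons]
    simp only [List.map_cons, List.filter_cons, nn8Occ, List.map_append, List.map_map]
    by_cases h : nn8Coord r = c
    · simp [h, ih (s + 1), Function.comp_def]
      intro a _; omega
    · simp [h, ih (s + 1), Function.comp_def]
      intro a _; omega

lemma nn8_dict_getD (pl : List (List Int)) (c : Int × Int) :
    ((PySem.List.enumerate pl).foldl
      (fun d q => d.modify (nn8Coord q.2) [] (· ++ [q.1])) PySem.Dict.empty).getD c []
    = nn8Occ c pl := by
  have h1 : (PySem.List.enumerate pl).foldl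
      (fun d q => d.modify (nn8Coord q.2) [] (· ++ [q.1])) PySem.Dict.empty
      = ((PySem.List.enumerate pl).map (fun q => (nn8Coord q.2, q.1))).foldl
          (fun d q => d.modify q.1 [] (· ++ [q.2])) PySem.Dict.empty := by
    rw [List.foldl_map]
  rw [h1, PySem.Dict.getD_foldl_modify_append]
  have := nn8_enum_occ pl c 0
  simpa using this

-- A's inner scan computes nn8Occ
-- Nat-position variant of nn8Occ, for A's index scan
def nn8OccN (c : Int × Int) : List (List Int) → List Nat
  | [] => []
  | r :: rest => (if nn8Coord r = c then [0] else []) ++ (nn8OccN c rest).map (· + 1)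

lemma nn8Occ_eq_map_occN (c : Int × Int) (pl : List (List Int)) :
    nn8Occ c pl = (nn8OccN c pl).map (fun (k : Nat) => (k : Int)) := by
  induction pl with
  | nil => rfl
  | cons r rest ih =>
    simp only [nn8Occ, nn8OccN, ih, List.map_append, List.map_map]
    by_cases h : nn8Coord r = c <;> simp [h, Function.comp_def]

lemma nn8_range_filter (pl : List (List Int)) (c : Int × Int) :
    (List.range pl.length).filter
        (fun k => nn8Coord (pl.getD k []) = c) = nn8OccN c pl := by
  induction pl with
  | nil => simp [nn8OccN]
  | cons r rest ih =>
    rw [List.length_cons, List.range_succ_eq_map, List.filter_cons]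
    by_cases h : nn8Coord r = c <;>
      simp [h, nn8OccN, List.filter_map, ← ih, Function.comp_def] <;>
        exact List.map_congr_left fun _ _ => rfl

lemma nn8_getElem_enumerate (pl : List (List Int)) : ∀ (s : Int) (k : Nat) (h : k < pl.length),
    (PySem.List.enumerate pl s)[k]'(by simpa [PySem.List.length_enumerate] using h)
      = (s + k, pl[k]) := by
  induction pl with
  | nil => intro s k h; simp at h
  | cons r rest ih =>
    intro s k h
    simp only [PySem.List.enumerate_cons]
    cases k with
    | zero => simp
    | succ k =>
      have hk : k < rest.length := by simpa using h
      simp only [List.getElem_cons_succ, ih (s + 1) k hk, Prod.mk.injEq]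
      exact ⟨by push_cast; ring, trivial⟩

-- ===== VERDICT (by name: the statement is the Claim_ definition above) =====
theorem nn8_spec : Claim_equal_nn8 := by
  intro pl _ _
  unfold Spec_nn8
  simp only [nn8, nn8_alt]
  apply List.ext_getElem
  · simp
  intro k h1 h2
  have hk : k < pl.length := by simpa using h2
  simp only [List.getElem_map]
  rw [PySem.List.getElem_pyRange_one]
  rw [nn8_getElem_enumerate pl 0 k (by simpa using h2)]
  simp only [zero_add]
  rw [PySem.List.pyGetD_map_pyRange _ pl.length k [] hk]
  simp only [PySem.List.pyGetD_natCast]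
  rw [List.getD_eq_getElem pl [] hk]
  have hbody : ∀ (acc : List Int) (m : List Int),
      (PySem.List.pyRange 0 (pl.length : Int) 1).foldl (fun acc2 nIdx =>
        if nn8Coord m = nn8Coord (PySem.List.pyGetD pl nIdx []) then acc2 ++ [nIdx] else acc2) acc
      = acc ++ nn8Occ (nn8Coord m) pl := by
    intro acc m
    rw [PySem.List.foldl_append_ite_eq_filter
      (fun nIdx => nn8Coord m = nn8Coord (PySem.List.pyGetD pl nIdx []))]
    congr 1
    rw [PySem.List.pyRange_zero_nat, List.filter_map]
    have hfc : List.filter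
        ((fun nIdx => decide (nn8Coord m = nn8Coord (PySem.List.pyGetD pl nIdx []))) ∘ (fun j : Nat => (j : Int)))
        (List.range pl.length)
        = List.filter (fun j => nn8Coord (pl.getD j []) = nn8Coord m) (List.range pl.length) := by
      apply List.filter_congr
      intro a _
      simp [eq_comm]
    rw [hfc, nn8_range_filter pl (nn8Coord m), ← nn8Occ_eq_map_occN]
  rw [PySem.List.foldl_congr_mem _ _
      (fun acc m => acc ++ nn8Occ (nn8Coord m) pl) _ (fun acc m _ => hbody acc m)]
  rw [PySem.List.foldl_append_eq_flatMap]
  rw [PySem.List.foldl_congr_mem _ _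
      (fun row c => row ++ nn8Occ c pl) _ (fun row c _ => by rw [nn8_dict_getD pl c])]
  rw [PySem.List.foldl_append_eq_flatMap]
  have hcoord : ∀ a b : Int, nn8Coord [a, b] = (a, b) := fun a b => rfl
  simp [nn8Nbrs, nn8NbrPairs, hcoord]
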